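-- pv_equiv track=rewrite | github.com/adducec03/2BD_project | new_version/k_grouping_new.py | calc_parameters
-- ===== SOURCE A (Python) =====
-- from typing import Dict, List, Tuple
-- from math import isqrt
-- from typing import Optional, Tuple
--
-- def calc_parameters(y: int) -> Tuple[bool, Optional[int], Optional[int], Optional[int]]:
--     """
--     Dato y ≥ 0, trova tutte le terne (a,b,c) con a,b,c ≥ 0 tali che:
--         y = (a+b)*c/2
--         a - 1 <= b <= a
--         a <= ceil(y/2)
--         c <= a
--
--     Restituisce la lista di soluzioni ordinate per:
--         1) |a-c| crescente
--         2) b crescente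
--         3) a crescente
--     """
--     if not isinstance(y, int):
--         raise TypeError("y deve essere un intero")
--     if y < 0:
--         raise ValueError("y deve essere ≥ 0")
--
--     if y == 0:
--         return [(0, 0, 0)]
--
--     n = 2 * y
--     a_max = (y + 1) // 2  # ceil(y/2)
--
--     sol_set = set()  # elimina i duplicati
--
--     for c in range(1, isqrt(n) + 1):
--         if n % c != 0:
--             continue
--         s = n // c
--
--         # prova con (s, c)
--         for a in (s // 2, (s + 1) // 2):
--             b = s - a
--             if a - 1 <= b <= a and a <= a_max and b >= 0 and c <= a:
--                 sol_set.add((a, b, c))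
--
--         # prova con (c, s) invertiti
--         if s != c:
--             c2, s2 = s, c
--             for a in (s2 // 2, (s2 + 1) // 2):
--                 b = s2 - a
--                 if a - 1 <= b <= a and a <= a_max and b >= 0 and c2 <= a:
--                     sol_set.add((a, b, c2))
--
--     sol = sorted(sol_set, key=lambda t: (abs(t[0] - t[2]), t[1], t[0]))
--     return sol
-- ===== SOURCE B (Python) =====
-- def _factorize(n):
--     # trial-division prime factorisation: n >= 1 -> list of (prime, exponent)
--     fs = []
--     p = 2
--     while p * p <= n:
--         if n % p == 0:
--             e = 0
--             while n % p == 0: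
--                 n //= p
--                 e += 1
--             fs.append((p, e))
--         p += 1
--     if n > 1:
--         fs.append((n, 1))
--     return fs
--
--
-- def _divisors(fs):
--     # all divisors of the number with factorisation fs, built multiplicatively
--     if not fs:
--         return [1]
--     p, e = fs[0]
--     rest = _divisors(fs[1:])
--     return [d * p ** k for k in range(e + 1) for d in rest]
--
--
-- def calc_parameters(y: int):
--     if not isinstance(y, int):
--         raise TypeError("y deve essere un intero")
--     if y < 0:
--         raise ValueError("y deve essere ≥ 0")
--     if y == 0:
--         return [(0, 0, 0)]
--     n = 2 * y
--     a_max = (y + 1) // 2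
--     sols = set()
--     # every solution has s = a+b dividing n, with a = ceil(s/2), b = floor(s/2), c = n//s
--     for s in _divisors(_factorize(n)):
--         a = (s + 1) // 2
--         b = s - a
--         c = n // s
--         if c <= a and a <= a_max:
--             sols.add((a, b, c))
--     return sorted(sols, key=lambda t: (abs(t[0] - t[2]), t[1], t[0]))
-- ===== Notes on version B (the rewrite author's own statement) =====
-- stated objective: alternative
-- what changed: B replaces A's scan of all candidates c up to isqrt(2y) with trial splits and orientation branches by a number-theoretic pipeline: it prime-factorises 2y by trial division, generates every divisor s multiplicatively from the factorisation, and maps each s directly to the unique closed-form triple a=(s+1)//2, b=s-a, c=2y//s under one two-part guard.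
import Mathlib
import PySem

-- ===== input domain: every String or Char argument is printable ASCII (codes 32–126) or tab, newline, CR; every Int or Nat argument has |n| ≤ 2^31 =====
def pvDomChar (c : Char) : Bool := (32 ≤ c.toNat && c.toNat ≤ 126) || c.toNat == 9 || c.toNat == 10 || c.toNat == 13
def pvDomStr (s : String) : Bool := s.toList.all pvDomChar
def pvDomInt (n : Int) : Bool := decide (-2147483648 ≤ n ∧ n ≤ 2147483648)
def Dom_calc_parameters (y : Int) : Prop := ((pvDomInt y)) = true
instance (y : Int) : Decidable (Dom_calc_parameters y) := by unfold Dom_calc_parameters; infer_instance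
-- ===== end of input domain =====

-- B replaces A's divisor scan (c up to isqrt(2y), legs derived from each divisor pair with
-- trial splits and orientation branches) by a different pipeline: prime-factorise 2y by trial
-- division, generate every divisor multiplicatively from the factorisation, and map each
-- divisor s to the closed-form triple ((s+1)//2, s//2, 2y//s); same exact result.

-- ===== PORT A =====
-- sort key shared by both Pythons: (abs(a-c), b, a), compared lexicographically
def pvKey (t : Int × Int × Int) : Lex (Int × Lex (Int × Int)) :=
  toLex (|t.1 - t.2.2|, toLex (t.2.1, t.1))

-- body of A's 'for c in range(1, isqrt(n)+1)' loop
def pvStepA (n aMax : Int) (st : PySem.Set (Int × Int × Int)) (c : Int) :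
    PySem.Set (Int × Int × Int) :=
  if PySem.Int.mod n c ≠ 0 then st
  else
    let s := PySem.Int.floordiv n c
    -- 'prova con (s, c)': for a in (s//2, (s+1)//2)
    let st1 := [PySem.Int.floordiv s 2, PySem.Int.floordiv (s+1) 2].foldl
      (fun st2 a =>
        let b := s - a
        if a - 1 ≤ b ∧ b ≤ a ∧ a ≤ aMax ∧ 0 ≤ b ∧ c ≤ a then PySem.Set.add st2 (a, b, c) else st2)
      st
    -- 'prova con (c, s) invertiti': c2, s2 = s, c
    if s ≠ c then
      [PySem.Int.floordiv c 2, PySem.Int.floordiv (c+1) 2].foldl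
        (fun st2 a =>
          let b := c - a
          if a - 1 ≤ b ∧ b ≤ a ∧ a ≤ aMax ∧ 0 ≤ b ∧ s ≤ a then PySem.Set.add st2 (a, b, s) else st2)
        st1
    else st1

-- math.isqrt (n ≥ 0) is Nat.sqrt
def pvSetA (y : Int) : PySem.Set (Int × Int × Int) :=
  (PySem.List.pyRange 1 ((Nat.sqrt (2*y).toNat : Int) + 1) 1).foldl
    (pvStepA (2*y) (PySem.Int.floordiv (y+1) 2)) PySem.Set.empty

def calc_parameters (y : Int) : List (Int × Int × Int) :=
  if y = 0 then [(0, 0, 0)]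
  else PySem.List.sorted (pvSetA y) pvKey false

-- ===== PORT B =====
-- Source B's inner 'while n % p == 0' loop of _factorize (count e, divide n); the
-- '2 <= p' and '0 < n' conjuncts are totality guards only (always true at call sites)
def pvStrip (p n : Nat) : Nat × Nat :=
  if h : 2 ≤ p ∧ 0 < n ∧ n % p = 0 then
    let r := pvStrip p (n / p)
    (r.1 + 1, r.2)
  else (0, n)
termination_by n
decreasing_by exact Nat.div_lt_self h.2.1 (by omega)

-- termination helpers for pvFacAux (cited by name in its decreasing_by)
theorem pvStrip_snd_le (p n : Nat) : (pvStrip p n).2 ≤ n := by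
  fun_induction pvStrip p n with
  | case1 n h r ih =>
    simp only at ih ⊢
    exact le_trans ih (Nat.div_le_self n p)
  | case2 n h => exact le_refl n

theorem pvStrip_snd_lt (p n : Nat) (hp : 2 ≤ p) (hn : 0 < n) (hd : n % p = 0) :
    (pvStrip p n).2 < n := by
  rw [pvStrip, dif_pos ⟨hp, hn, hd⟩]
  exact lt_of_le_of_lt (pvStrip_snd_le p (n / p)) (Nat.div_lt_self hn (by omega))

-- Source B's _factorize outer 'while p*p <= n' loop (starts at p = 2, then the n > 1 tail);
-- Nat arithmetic is exact: Python only reaches it with nonnegative ints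
def pvFacAux (p n : Nat) : List (Nat × Nat) :=
  if h : 2 ≤ p ∧ p * p ≤ n then
    if hd : n % p = 0 then
      let r := pvStrip p n
      (p, r.1) :: pvFacAux (p + 1) r.2
    else pvFacAux (p + 1) n
  else if 1 < n then [(n, 1)] else []
termination_by n + 1 - p
decreasing_by
  · have h0 : 0 < n := by nlinarith [h.2]
    have h1 : (pvStrip p n).2 < n := pvStrip_snd_lt p n h.1 h0 hd
    have h2 : p ≤ p * p := Nat.le_mul_of_pos_left p (by omega)
    omega
  · have h2 : p ≤ p * p := Nat.le_mul_of_pos_left p (by omega)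
    omega

-- Source B's _divisors: all divisors generated multiplicatively from the factorisation
def pvDivs : List (Nat × Nat) → List Nat
  | [] => [1]
  | (p, e) :: rest => (List.range (e + 1)).flatMap (fun k => (pvDivs rest).map (fun d => d * p ^ k))

-- Source B's main loop over the divisors s of n = 2y (Nat division = Python // on nonnegatives)
def pvSetB (y : Int) : PySem.Set (Int × Int × Int) :=
  (pvDivs (pvFacAux 2 (2 * y).toNat)).foldl
    (fun st s =>
      let a : Nat := (s + 1) / 2
      let b : Nat := s - a
      let c : Nat := (2 * y).toNat / s
      if (c : Int) ≤ (a : Int) ∧ (a : Int) ≤ PySem.Int.floordiv (y + 1) 2 then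
        PySem.Set.add st ((a : Int), (b : Int), (c : Int))
      else st)
    PySem.Set.empty

def calc_parameters_alt (y : Int) : List (Int × Int × Int) :=
  if y = 0 then [(0, 0, 0)]
  else PySem.List.sorted (pvSetB y) pvKey false

-- ===== PRECONDITION & SPEC =====
-- A raises ValueError exactly on y < 0; Pre_ excludes those inputs.
def Pre_calc_parameters (y : Int) : Prop := 0 ≤ y
instance (y : Int) : Decidable (Pre_calc_parameters y) := by unfold Pre_calc_parameters; infer_instance
def pvWitness_calc_parameters : Int := 12

def Spec_calc_parameters (y : Int) (out : List (Int × Int × Int)) : Prop := out = calc_parameters_alt y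
instance (y : Int) (out : List (Int × Int × Int)) : Decidable (Spec_calc_parameters y out) := by
  unfold Spec_calc_parameters; infer_instance

-- ===== CLAIM (what is proved, stated in full; the proofs are below) =====
def Claim_equal_calc_parameters : Prop :=
  ∀ (y : Int), Dom_calc_parameters y → Pre_calc_parameters y →
    Spec_calc_parameters y (calc_parameters y)

-- ===== LEMMAS AND PROOFS =====

-- the common mathematical description of both solution sets, for 1 ≤ y
def pvP (y a b c : Int) : Prop :=
  1 ≤ c ∧ c ≤ a ∧ a ≤ PySem.Int.floordiv (y+1) 2 ∧
  a - 1 ≤ b ∧ b ≤ a ∧ 0 ≤ b ∧ (a + b) * c = 2*y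

theorem pv_mem_foldl_iff {T S : Type} (t : T) (f : List T → S → List T) (l : List S)
    (init : List T) (hf : ∀ st c, t ∈ f st c ↔ t ∈ st ∨ t ∈ f [] c) :
    t ∈ l.foldl f init ↔ t ∈ init ∨ ∃ c ∈ l, t ∈ f [] c := by
  induction l generalizing init with
  | nil =>
    simp only [List.foldl_nil, List.not_mem_nil, false_and, exists_false, or_false,
      List.exists_mem_nil]
  | cons c l ih =>
    rw [List.foldl_cons, ih, hf init c]
    simp only [List.mem_cons]
    constructor
    · rintro ((h | h) | h)
      · exact Or.inl h
      · exact Or.inr ⟨c, Or.inl rfl, h⟩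
      · obtain ⟨d, hd, hm⟩ := h; exact Or.inr ⟨d, Or.inr hd, hm⟩
    · rintro (h | ⟨d, (rfl | hd), hm⟩)
      · exact Or.inl (Or.inl h)
      · exact Or.inl (Or.inr hm)
      · exact Or.inr ⟨d, hd, hm⟩

theorem pv_nodup_foldl {T S : Type} (f : List T → S → List T) (l : List S)
    (init : List T) (hf : ∀ st c, st.Nodup → (f st c).Nodup) (h : init.Nodup) :
    (l.foldl f init).Nodup := by
  induction l generalizing init with
  | nil => exact h
  | cons c l ih => exact ih _ (hf _ _ h)

theorem pv_mem_condAdd (p : Prop) [Decidable p] (x t : Int × Int × Int)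
    (st : PySem.Set (Int × Int × Int)) :
    (t ∈ if p then PySem.Set.add st x else st) ↔ t ∈ st ∨ (p ∧ t = x) := by
  split_ifs with h
  · simp [PySem.Set.mem_add, h]
  · simp [h]

theorem pv_nodup_condAdd (p : Prop) [Decidable p] (x : Int × Int × Int)
    (st : PySem.Set (Int × Int × Int)) (h : st.Nodup) :
    (if p then PySem.Set.add st x else st).Nodup := by
  split_ifs
  · exact PySem.Set.nodup_add _ _ h
  · exact h

theorem pv_mem_stepA (n aMax : Int) (st : PySem.Set (Int × Int × Int)) (c : Int)
    (t : Int × Int × Int) : t ∈ pvStepA n aMax st c ↔ t ∈ st ∨ t ∈ pvStepA n aMax [] c := by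
  unfold pvStepA
  by_cases hm : PySem.Int.mod n c = 0
  · rw [if_neg (not_not_intro hm), if_neg (not_not_intro hm)]
    by_cases hs : PySem.Int.floordiv n c = c
    · rw [if_neg (not_not_intro hs), if_neg (not_not_intro hs)]
      simp only [List.foldl, pv_mem_condAdd, List.not_mem_nil, false_or, or_assoc]
    · rw [if_pos hs, if_pos hs]
      simp only [List.foldl, pv_mem_condAdd, List.not_mem_nil, false_or, or_assoc]
  · rw [if_pos hm, if_pos hm]
    simp only [List.not_mem_nil, or_false]

theorem pv_nodup_stepA (n aMax : Int) (st : PySem.Set (Int × Int × Int)) (c : Int)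
    (h : st.Nodup) : (pvStepA n aMax st c).Nodup := by
  unfold pvStepA
  by_cases hm : PySem.Int.mod n c = 0
  · rw [if_neg (not_not_intro hm)]
    by_cases hs : PySem.Int.floordiv n c = c
    · rw [if_neg (not_not_intro hs)]
      simp only [List.foldl]
      exact pv_nodup_condAdd _ _ _ (pv_nodup_condAdd _ _ _ h)
    · rw [if_pos hs]
      simp only [List.foldl]
      exact pv_nodup_condAdd _ _ _ (pv_nodup_condAdd _ _ _
        (pv_nodup_condAdd _ _ _ (pv_nodup_condAdd _ _ _ h)))
  · rw [if_pos hm]; exact h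

theorem pv_divisor_eq (n c : Int) (hm : PySem.Int.mod n c = 0) :
    PySem.Int.floordiv n c * c = n := by
  have := PySem.Int.floordiv_mul_add_mod n c
  omega

theorem pv_le_sqrt (c n : Int) (h1 : 1 ≤ c) (hcc : c * c ≤ n) :
    c ≤ (Nat.sqrt n.toNat : Int) := by
  have hc0 : 0 ≤ c := by omega
  have hn0 : 0 ≤ n := le_trans (by nlinarith) hcc
  have h : c.toNat * c.toNat ≤ n.toNat := by
    have : (c.toNat : Int) * (c.toNat : Int) ≤ (n.toNat : Int) := by
      rw [Int.toNat_of_nonneg hc0, Int.toNat_of_nonneg hn0]; exact hcc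
    exact_mod_cast this
  have h2 := Nat.le_sqrt.mpr h
  omega

theorem pv_mem_setA (y : Int) (hy : 1 ≤ y) (a b c : Int) :
    (a, b, c) ∈ pvSetA y ↔ pvP y a b c := by
  unfold pvSetA
  rw [pv_mem_foldl_iff (a, b, c) _ _ _
    (fun st c0 => pv_mem_stepA (2*y) (PySem.Int.floordiv (y+1) 2) st c0 (a, b, c))]
  simp only [PySem.Set.empty, List.not_mem_nil, false_or]
  constructor
  · rintro ⟨c0, hcr, hmem⟩
    rw [PySem.List.mem_pyRange_one] at hcr
    obtain ⟨hc1, -⟩ := hcr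
    unfold pvStepA at hmem
    by_cases hm : PySem.Int.mod (2*y) c0 = 0
    · rw [if_neg (not_not_intro hm)] at hmem
      have hsc : PySem.Int.floordiv (2*y) c0 * c0 = 2*y := pv_divisor_eq _ _ hm
      have hs1 : 1 ≤ PySem.Int.floordiv (2*y) c0 := by nlinarith
      set s := PySem.Int.floordiv (2*y) c0 with hs_def
      by_cases hs : s = c0
      · rw [if_neg (not_not_intro hs)] at hmem
        simp only [List.foldl, pv_mem_condAdd, List.not_mem_nil, false_or, or_assoc,
          Prod.mk.injEq] at hmem
        unfold pvP
        rcases hmem with ⟨⟨g1, g2, g3, g4, g5⟩, rfl, rfl, rfl⟩ |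
            ⟨⟨g1, g2, g3, g4, g5⟩, rfl, rfl, rfl⟩ <;>
          exact ⟨by omega, by omega, by omega, by omega, by omega, by omega,
            by linear_combination hsc⟩
      · rw [if_pos hs] at hmem
        simp only [List.foldl, pv_mem_condAdd, List.not_mem_nil, false_or, or_assoc,
          Prod.mk.injEq] at hmem
        unfold pvP
        rcases hmem with ⟨⟨g1, g2, g3, g4, g5⟩, rfl, rfl, rfl⟩ |
            ⟨⟨g1, g2, g3, g4, g5⟩, rfl, rfl, rfl⟩ |
            ⟨⟨g1, g2, g3, g4, g5⟩, rfl, rfl, rfl⟩ |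
            ⟨⟨g1, g2, g3, g4, g5⟩, rfl, rfl, rfl⟩
        · exact ⟨by omega, by omega, by omega, by omega, by omega, by omega,
            by linear_combination hsc⟩
        · exact ⟨by omega, by omega, by omega, by omega, by omega, by omega,
            by linear_combination hsc⟩
        · exact ⟨by omega, by omega, by omega, by omega, by omega, by omega,
            by linear_combination hsc⟩
        · exact ⟨by omega, by omega, by omega, by omega, by omega, by omega,
            by linear_combination hsc⟩
    · rw [if_pos hm] at hmem
      simp at hmem
  · intro h
    obtain ⟨h1, h2, h3, h4, h5, h6, h7⟩ := h
    refine ⟨c, ?_, ?_⟩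
    · rw [PySem.List.mem_pyRange_one]
      have hcab : c ≤ a + b := by omega
      have hcc : c * c ≤ 2*y := by
        nlinarith [mul_le_mul_of_nonneg_left hcab (by omega : (0:Int) ≤ c), h7]
      have := pv_le_sqrt c (2*y) h1 hcc
      omega
    · have hm : PySem.Int.mod (2*y) c = 0 :=
        (PySem.Int.mod_eq_zero_iff_dvd _ _).mpr ⟨a + b, by linarith [h7]⟩
      have hsab : PySem.Int.floordiv (2*y) c = a + b := by
        rw [PySem.Int.floordiv_eq_iff_of_pos (by omega)]
        refine ⟨le_of_eq h7, ?_⟩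
        have e : (a + b + 1) * c = 2*y + c := by linear_combination h7
        rw [e]; omega
      have hb : b = a ∨ b = a - 1 := by omega
      unfold pvStepA
      rw [if_neg (not_not_intro hm)]
      by_cases hs : PySem.Int.floordiv (2*y) c = c
      · rw [if_neg (not_not_intro hs)]
        simp only [List.foldl, pv_mem_condAdd, List.not_mem_nil, false_or, or_assoc]
        rcases hb with hba | hba
        · left
          have ha : PySem.Int.floordiv (PySem.Int.floordiv (2*y) c) 2 = a := by
            rw [hsab, PySem.Int.floordiv_eq_iff_of_pos (by omega)]; omega
          refine ⟨⟨by omega, by omega, by omega, by omega, by omega⟩, ?_⟩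
          simp only [Prod.mk.injEq, eq_self_iff_true, and_true, true_and]
          first | trivial | omega
        · right
          have ha : PySem.Int.floordiv (PySem.Int.floordiv (2*y) c + 1) 2 = a := by
            rw [hsab, PySem.Int.floordiv_eq_iff_of_pos (by omega)]; omega
          refine ⟨⟨by omega, by omega, by omega, by omega, by omega⟩, ?_⟩
          simp only [Prod.mk.injEq, eq_self_iff_true, and_true, true_and]
          first | trivial | omega
      · rw [if_pos hs]
        simp only [List.foldl, pv_mem_condAdd, List.not_mem_nil, false_or, or_assoc]
        rcases hb with hba | hba
        · left
          have ha : PySem.Int.floordiv (PySem.Int.floordiv (2*y) c) 2 = a := by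
            rw [hsab, PySem.Int.floordiv_eq_iff_of_pos (by omega)]; omega
          refine ⟨⟨by omega, by omega, by omega, by omega, by omega⟩, ?_⟩
          simp only [Prod.mk.injEq, eq_self_iff_true, and_true, true_and]
          first | trivial | omega
        · right; left
          have ha : PySem.Int.floordiv (PySem.Int.floordiv (2*y) c + 1) 2 = a := by
            rw [hsab, PySem.Int.floordiv_eq_iff_of_pos (by omega)]; omega
          refine ⟨⟨by omega, by omega, by omega, by omega, by omega⟩, ?_⟩
          simp only [Prod.mk.injEq, eq_self_iff_true, and_true, true_and]
          first | trivial | omega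

-- ===== B-side lemmas: factorisation and divisor-list correctness =====
def pvProd : List (Nat × Nat) → Nat
  | [] => 1
  | (p, e) :: r => p ^ e * pvProd r

theorem pvStrip_spec : ∀ n p : Nat, 2 ≤ p → 0 < n →
    p ^ (pvStrip p n).1 * (pvStrip p n).2 = n ∧ ¬ p ∣ (pvStrip p n).2 ∧ 0 < (pvStrip p n).2 := by
  intro n
  induction n using Nat.strong_induction_on with
  | _ n ih =>
    intro p hp hn
    rw [pvStrip]
    by_cases h : 2 ≤ p ∧ 0 < n ∧ n % p = 0
    · rw [dif_pos h]
      have hdvd : p ∣ n := Nat.dvd_of_mod_eq_zero h.2.2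
      have hlt : n / p < n := Nat.div_lt_self hn (by omega)
      have hnp : 0 < n / p := Nat.div_pos (Nat.le_of_dvd hn hdvd) (by omega)
      obtain ⟨e1, e2, e3⟩ := ih (n / p) hlt p hp hnp
      refine ⟨?_, e2, e3⟩
      simp only [pow_succ]
      calc p ^ (pvStrip p (n / p)).1 * p * (pvStrip p (n / p)).2
          = p * (p ^ (pvStrip p (n / p)).1 * (pvStrip p (n / p)).2) := by ring
        _ = p * (n / p) := by rw [e1]
        _ = n := Nat.mul_div_cancel' hdvd
    · rw [dif_neg h]
      refine ⟨by simp, ?_, hn⟩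
      intro hdvd
      obtain ⟨k, rfl⟩ := hdvd
      exact h ⟨hp, hn, Nat.mul_mod_right p k⟩

theorem pvFacAux_spec : ∀ k n p : Nat, n + 1 - p ≤ k → 2 ≤ p → 0 < n →
    (∀ q, 2 ≤ q → q < p → ¬ q ∣ n) →
    pvProd (pvFacAux p n) = n ∧ ∀ pe ∈ pvFacAux p n, Nat.Prime pe.1 := by
  intro k
  induction k with
  | zero =>
    intro n p hk hp hn hmin
    have hpn : n < p := by omega
    rw [pvFacAux]
    have hg : ¬ (2 ≤ p ∧ p * p ≤ n) := by
      rintro ⟨h1, h2⟩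
      have := Nat.le_mul_of_pos_left p (show 0 < p by omega)
      omega
    rw [dif_neg hg]
    have h1 : ¬ 1 < n := by
      intro h1
      exact hmin n (by omega) hpn dvd_rfl
    rw [if_neg h1]
    exact ⟨by simp [pvProd]; omega, by simp⟩
  | succ k ih =>
    intro n p hk hp hn hmin
    rw [pvFacAux]
    by_cases hg : 2 ≤ p ∧ p * p ≤ n
    · rw [dif_pos hg]
      by_cases hd : n % p = 0
      · rw [dif_pos hd]
        obtain ⟨hprod, hnodvd, hmpos⟩ := pvStrip_spec n p hp hn
        have hpdvd : p ∣ n := Nat.dvd_of_mod_eq_zero hd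
        have he : 0 < (pvStrip p n).1 := by
          rcases Nat.eq_zero_or_pos (pvStrip p n).1 with h0 | h
          · exfalso
            apply hnodvd
            rw [h0, pow_zero, one_mul] at hprod
            rw [hprod]
            exact hpdvd
          · exact h
        have hmdvd : (pvStrip p n).2 ∣ n := dvd_of_mul_left_eq _ hprod
        have hmlt : (pvStrip p n).2 < n := pvStrip_snd_lt p n hp hn hd
        have hmin' : ∀ q, 2 ≤ q → q < p + 1 → ¬ q ∣ (pvStrip p n).2 := by
          intro q h2 hq hqd
          by_cases hqp : q < p
          · exact hmin q h2 hqp (hqd.trans hmdvd)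
          · have : q = p := by omega
            exact hnodvd (this ▸ hqd)
        obtain ⟨hP, hAll⟩ := ih (pvStrip p n).2 (p + 1) (by omega) (by omega) hmpos hmin'
        refine ⟨?_, ?_⟩
        · simp only [pvProd, hP]
          exact hprod
        · intro pe hpe
          rcases List.mem_cons.mp hpe with rfl | hpe
          · -- p is prime: it has no divisor in [2, p)
            rw [Nat.prime_def_lt]
            refine ⟨hp, ?_⟩
            intro m hm hmd
            by_contra hm1
            have hm0 : m ≠ 0 := by
              rintro rfl
              have := Nat.eq_zero_of_zero_dvd hmd
              omega
            exact hmin m (by omega) hm (hmd.trans hpdvd)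
          · exact hAll pe hpe
      · rw [dif_neg hd]
        have hppos : p ≤ p * p := Nat.le_mul_of_pos_left p (by omega)
        refine ih n (p + 1) (by omega) (by omega) hn ?_
        intro q h2 hq hqd
        by_cases hqp : q < p
        · exact hmin q h2 hqp hqd
        · have : q = p := by omega
          subst this
          obtain ⟨k, rfl⟩ := hqd
          exact absurd (Nat.mul_mod_right q k) hd
    · rw [dif_neg hg]
      by_cases h1 : 1 < n
      · rw [if_pos h1]
        refine ⟨by simp [pvProd], ?_⟩
        intro pe hpe
        rcases List.mem_cons.mp hpe with rfl | hpe
        · -- n is prime: it has no divisor d with d*d ≤ n, and n < p*p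
          simp only
          rw [Nat.prime_def_lt]
          refine ⟨h1, ?_⟩
          intro m hm hmd
          by_contra hm1
          have hm0 : m ≠ 0 := by
            rintro rfl
            have := Nat.eq_zero_of_zero_dvd hmd
            omega
          have hnpp : n < p * p := by omega
          obtain ⟨w, hw⟩ := hmd
          have hmd' : m ∣ n := ⟨w, hw⟩
          have hw2 : 2 ≤ w := by
            rcases Nat.lt_or_ge w 2 with h | h
            · interval_cases w <;> omega
            · exact h
          have hwd : w ∣ n := ⟨m, by rw [hw, Nat.mul_comm]⟩
          rcases Nat.le_total m w with hmw | hwm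
          · have hdd : m * m ≤ n := by nlinarith [hw]
            have hmp : m < p := by nlinarith
            exact hmin m (by omega) hmp hmd'
          · have hdd : w * w ≤ n := by nlinarith [hw]
            have hwp : w < p := by nlinarith
            exact hmin w hw2 hwp hwd
        · simp at hpe
      · rw [if_neg h1]
        exact ⟨by simp [pvProd]; omega, by simp⟩

theorem pv_mem_divs : ∀ fs : List (Nat × Nat), (∀ pe ∈ fs, Nat.Prime pe.1) → ∀ d : Nat,
    (d ∈ pvDivs fs ↔ d ∣ pvProd fs) := by
  intro fs
  induction fs with
  | nil =>
    intro _ d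
    simp [pvDivs, pvProd, Nat.dvd_one]
  | cons pe rest ih =>
    intro h d
    obtain ⟨p, e⟩ := pe
    have hp : p.Prime := h (p, e) (List.mem_cons_self)
    have hrest := ih (fun q hq => h q (List.mem_cons_of_mem _ hq))
    simp only [pvDivs, pvProd, List.mem_flatMap, List.mem_map, List.mem_range]
    constructor
    · rintro ⟨k, hk, d0, hd0, rfl⟩
      have h1 : d0 ∣ pvProd rest := (hrest d0).mp hd0
      have h2 : p ^ k ∣ p ^ e := pow_dvd_pow p (by omega)
      calc d0 * p ^ k ∣ pvProd rest * p ^ e := mul_dvd_mul h1 h2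
        _ = p ^ e * pvProd rest := mul_comm _ _
    · intro hd
      obtain ⟨d1, d2, hd1, hd2, hprod⟩ := Nat.dvd_mul.mp hd
      obtain ⟨k, hk, rfl⟩ := (Nat.dvd_prime_pow hp).mp hd1
      exact ⟨k, by omega, d2, (hrest d2).mpr hd2, by rw [← hprod]; ring⟩

theorem pv_mem_divisors (N : Nat) (hN : 0 < N) (d : Nat) :
    d ∈ pvDivs (pvFacAux 2 N) ↔ d ∣ N := by
  obtain ⟨hP, hAll⟩ := pvFacAux_spec (N + 1) N 2 (by omega) (by omega) hN
    (by intro q h1 h2 _; omega)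
  rw [pv_mem_divs _ hAll, hP]

theorem pv_mem_setB (y : Int) (hy : 1 ≤ y) (a b c : Int) :
    (a, b, c) ∈ pvSetB y ↔ pvP y a b c := by
  have hN : ((2 * y).toNat : Int) = 2 * y := Int.toNat_of_nonneg (by omega)
  have hN0 : 0 < (2 * y).toNat := by omega
  unfold pvSetB
  rw [pv_mem_foldl_iff (a, b, c) _ _ _
    (fun st s => by simp only [pv_mem_condAdd, List.not_mem_nil, false_or])]
  simp only [PySem.Set.empty, List.not_mem_nil, false_or, pv_mem_condAdd, Prod.mk.injEq]
  constructor
  · rintro ⟨s, hsmem, ⟨g1, g2⟩, rfl, rfl, rfl⟩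
    have hsd : s ∣ (2 * y).toNat := (pv_mem_divisors _ hN0 s).mp hsmem
    have hs0 : 0 < s := by
      rcases Nat.eq_zero_or_pos s with rfl | h
      · have := Nat.eq_zero_of_zero_dvd hsd; omega
      · exact h
    obtain ⟨m, hm⟩ := hsd
    have hm1 : 0 < m := by
      rcases Nat.eq_zero_or_pos m with rfl | h
      · omega
      · exact h
    have hc : (2 * y).toNat / s = m := by rw [hm]; exact Nat.mul_div_cancel_left m hs0
    rw [hc] at g1 ⊢
    have hab : (s + 1) / 2 + (s - (s + 1) / 2) = s := by omega
    unfold pvP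
    refine ⟨by exact_mod_cast hm1, g1, g2, by omega, by omega, by omega, ?_⟩
    have : (((s + 1) / 2 : Nat) : Int) + ((s - (s + 1) / 2 : Nat) : Int) = (s : Int) := by
      omega
    rw [this]
    calc (s : Int) * (m : Int) = ((s * m : Nat) : Int) := by push_cast; ring
      _ = (((2 * y).toNat : Nat) : Int) := by rw [hm]
      _ = 2 * y := hN
  · intro h
    obtain ⟨h1, h2, h3, h4, h5, h6, h7⟩ := h
    have ha1 : 1 ≤ a := by omega
    have hsc : ((a + b).toNat : Int) = a + b := Int.toNat_of_nonneg (by omega)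
    have hcc : (c.toNat : Int) = c := Int.toNat_of_nonneg (by omega)
    have hsN : (a + b).toNat * c.toNat = (2 * y).toNat := by
      have : (((a + b).toNat * c.toNat : Nat) : Int) = (((2 * y).toNat : Nat) : Int) := by
        push_cast
        rw [hsc, hcc, hN]
        exact h7
      exact_mod_cast this
    refine ⟨(a + b).toNat, (pv_mem_divisors _ hN0 _).mpr ⟨c.toNat, hsN.symm⟩, ?_⟩
    have hs0 : 0 < (a + b).toNat := by omega
    have hA : (((a + b).toNat + 1) / 2 : Nat) = a.toNat := by omega
    have hB : ((a + b).toNat - ((a + b).toNat + 1) / 2 : Nat) = b.toNat := by omega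
    have hC : (2 * y).toNat / (a + b).toNat = c.toNat := by
      rw [← hsN]
      exact Nat.mul_div_cancel_left _ hs0
    simp only [hA, hB, hC]
    refine ⟨⟨by omega, by omega⟩, by omega, by omega, by omega⟩

theorem pv_nodup_setB (y : Int) : (pvSetB y).Nodup := by
  unfold pvSetB
  refine pv_nodup_foldl _ _ _ (fun st s h => ?_) List.nodup_nil
  exact pv_nodup_condAdd _ _ _ h

theorem pv_nodup_setA (y : Int) : (pvSetA y).Nodup :=
  pv_nodup_foldl _ _ _ (pv_nodup_stepA _ _) List.nodup_nil

theorem pv_key_inj (y : Int) (t t' : Int × Int × Int)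
    (ht : pvP y t.1 t.2.1 t.2.2) (ht' : pvP y t'.1 t'.2.1 t'.2.2)
    (hk : pvKey t = pvKey t') : t = t' := by
  obtain ⟨a, b, c⟩ := t
  obtain ⟨a', b', c'⟩ := t'
  obtain ⟨h1, h2, h3, h4, h5, h6, h7⟩ := ht
  obtain ⟨g1, g2, g3, g4, g5, g6, g7⟩ := ht'
  simp only [pvKey, toLex_inj, Prod.mk.injEq] at hk
  obtain ⟨hab, hb, ha⟩ := hk
  simp only at *
  subst ha hb
  have hcc : (a + b) * c = (a + b) * c' := by omega
  have : c = c' := mul_left_cancel₀ (by omega) hcc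
  simp [this]

theorem pv_sorted_eq (y : Int) (hy : 1 ≤ y) :
    PySem.List.sorted (pvSetA y) pvKey false = PySem.List.sorted (pvSetB y) pvKey false := by
  have hmemP : ∀ t : Int × Int × Int, t ∈ pvSetB y ↔ pvP y t.1 t.2.1 t.2.2 := fun t => by
    obtain ⟨a, b, c⟩ := t; exact pv_mem_setB y hy a b c
  have hmem : ∀ t : Int × Int × Int, t ∈ pvSetB y ↔ t ∈ pvSetA y := fun t => by
    obtain ⟨a, b, c⟩ := t
    rw [pv_mem_setB y hy, pv_mem_setA y hy]
  have hperm : (pvSetB y).Perm (pvSetA y) :=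
    (List.perm_ext_iff_of_nodup (pv_nodup_setB y) (pv_nodup_setA y)).mpr hmem
  have hLperm : (PySem.List.sorted (pvSetB y) pvKey false).Perm (pvSetA y) :=
    (PySem.List.sorted_perm _ _ _).trans hperm
  have hnodL : (PySem.List.sorted (pvSetB y) pvKey false).Nodup :=
    ((PySem.List.sorted_perm _ _ _).symm).nodup (pv_nodup_setB y)
  have hle : (PySem.List.sorted (pvSetB y) pvKey false).Pairwise
      (fun u v => pvKey u ≤ pvKey v) := PySem.List.sorted_pairwise _ _
  have hne : (PySem.List.sorted (pvSetB y) pvKey false).Pairwise (· ≠ ·) := hnodL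
  have hlt : (PySem.List.sorted (pvSetB y) pvKey false).Pairwise
      (fun u v => pvKey u < pvKey v) := by
    refine (hle.and hne).imp_of_mem ?_
    intro u v hu hv huv
    obtain ⟨hL, hN⟩ := huv
    rcases lt_or_eq_of_le hL with h | h
    · exact h
    · exfalso
      apply hN
      have hu' := (hmemP u).mp ((PySem.List.mem_sorted _ _ _ _).mp hu)
      have hv' := (hmemP v).mp ((PySem.List.mem_sorted _ _ _ _).mp hv)
      exact pv_key_inj y u v hu' hv' h
  exact PySem.List.sorted_eq_of_perm_of_pairwise_lt _ _ _ hLperm hlt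

-- ===== VERDICT (by name: the statement is the Claim_ definition above) =====
theorem calc_parameters_spec : Claim_equal_calc_parameters := by
  intro y _ hy
  unfold Spec_calc_parameters calc_parameters calc_parameters_alt
  by_cases h0 : y = 0
  · rw [if_pos h0, if_pos h0]
  · rw [if_neg h0, if_neg h0]
    exact pv_sorted_eq y (by unfold Pre_calc_parameters at hy; omega)
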